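-- pv_equiv track=rewrite | github.com/Irene3104/UTS_FSD_DeskBankAppSystem | lab05/lab5exc5.py | generate_nums
-- ===== SOURCE A (Python) =====
-- def generate_nums(n):
--     length = 2 * n - 1
--     nums = []
--     for i in range(n):
--         nums.append(i + 1)
--     for i in range(n, length):
--         nums.append(2 * n - i - 1)
--     return nums
-- ===== SOURCE B (Python) =====
-- def generate_nums(n):
--     up = list(range(1, n + 1))
--     return up + up[:-1][::-1]
-- ===== Notes on version B (the rewrite author's own statement) =====
-- stated objective: idiomatic
-- what changed: Builds the ascending half once with range(1, n+1) and mirrors it by the reversed slice up[:-1][::-1], instead of a second index loop recomputing each mirrored value arithmetically.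
import Mathlib
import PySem

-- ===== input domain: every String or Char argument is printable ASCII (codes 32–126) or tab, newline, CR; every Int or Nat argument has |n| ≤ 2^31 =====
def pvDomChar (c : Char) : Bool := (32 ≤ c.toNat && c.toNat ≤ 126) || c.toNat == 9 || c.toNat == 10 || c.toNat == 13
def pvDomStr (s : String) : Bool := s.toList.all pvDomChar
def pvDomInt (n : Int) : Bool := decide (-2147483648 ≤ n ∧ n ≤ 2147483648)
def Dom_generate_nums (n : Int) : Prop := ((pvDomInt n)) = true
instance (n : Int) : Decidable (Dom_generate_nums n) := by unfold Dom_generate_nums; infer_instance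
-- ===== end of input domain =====

-- B builds the ascending half once with range(1, n+1) and mirrors it via the reversed
-- slice up[:-1][::-1], instead of A's second index loop recomputing each mirrored value arithmetically (idiomatic).


-- ===== PORT A =====
-- Two range loops, appending the ascending then the descending values.
def generate_nums (n : Int) : List Int :=
  let length := 2 * n - 1
  let nums : List Int := []
  let nums := (PySem.List.pyRange 0 n 1).foldl (fun acc i => acc ++ [i + 1]) nums
  let nums := (PySem.List.pyRange n length 1).foldl (fun acc i => acc ++ [2 * n - i - 1]) nums
  nums

-- ===== PORT B =====
-- up = list(range(1, n+1)); return up + up[:-1][::-1].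
-- slice? with step -1 never raises, so .getD [] only unwraps an always-`some` result.
def generate_nums_alt (n : Int) : List Int :=
  let up := PySem.List.pyRange 1 (n + 1) 1
  up ++ (PySem.List.slice? (PySem.List.slice up none (some (-1))) none none (-1)).getD []

-- ===== PRECONDITION & SPEC =====
def Spec_generate_nums (n : Int) (out : List Int) : Prop := out = generate_nums_alt n
instance (n : Int) (out : List Int) : Decidable (Spec_generate_nums n out) := by unfold Spec_generate_nums; infer_instance

-- ===== CLAIM (what is proved, stated in full; the proofs are below) =====
def Claim_equal_generate_nums : Prop := ∀ (n : Int), Dom_generate_nums n → Spec_generate_nums n (generate_nums n)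

-- ===== LEMMAS AND PROOFS =====
-- A's first loop produces exactly B's ascending half 1..n.
lemma first_loop_eq (n : Int) :
    (PySem.List.pyRange 0 n 1).map (fun i => i + 1) = PySem.List.pyRange 1 (n + 1) 1 := by
  apply List.ext_getElem
  · simp only [List.length_map, PySem.List.length_pyRange_one]; omega
  · intro i h1 h2
    simp only [List.getElem_map, PySem.List.getElem_pyRange_one]
    omega

-- A's second loop produces exactly the reversed prefix n-1..1.
lemma second_loop_eq (n : Int) :
    (PySem.List.pyRange n (2 * n - 1) 1).map (fun i => 2 * n - i - 1)
      = (PySem.List.pyRange 1 n 1).reverse := by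
  apply List.ext_getElem
  · simp only [List.length_map, List.length_reverse, PySem.List.length_pyRange_one]; omega
  · intro i h1 h2
    simp only [List.length_map, PySem.List.length_pyRange_one] at h1
    rw [List.getElem_reverse]
    simp only [List.getElem_map, PySem.List.getElem_pyRange_one,
      PySem.List.length_pyRange_one] at *
    omega

-- dropping the peak from 1..n gives 1..n-1 (both empty when n ≤ 0)
lemma dropLast_up (n : Int) :
    (PySem.List.pyRange 1 (n + 1) 1).dropLast = PySem.List.pyRange 1 n 1 := by
  by_cases h : 1 ≤ n
  · rw [PySem.List.pyRange_one_succ_right h]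
    simp
  · rw [PySem.List.pyRange_one_eq_nil (a := (1:Int)) (b := n + 1) (by omega),
        PySem.List.pyRange_one_eq_nil (a := (1:Int)) (b := n) (by omega)]
    rfl

-- ===== VERDICT (by name: the statement is the Claim_ definition above) =====
theorem generate_nums_spec : Claim_equal_generate_nums := by
  intro n _
  unfold Spec_generate_nums
  simp only [generate_nums, generate_nums_alt]
  rw [PySem.List.slice_to_neg_one, PySem.List.slice?_none_none_neg_one,
    PySem.List.foldl_append_singleton_eq_map, PySem.List.foldl_append_singleton_eq_map]
  simp only [Option.getD_some, List.nil_append]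
  rw [first_loop_eq, second_loop_eq, dropLast_up]
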